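-- pv_equiv track=rewrite | github.com/cuioss/plan-marshall | marketplace/bundles/pm-dev-frontend/skills/js-fix-jsdoc/scripts/jsdoc.py | extract_function_params
-- ===== SOURCE A (Python) =====
-- def extract_function_params(param_str: str) -> list[str]:
--     """Extract parameter names from function signature."""
--     if not param_str.strip():
--         return []
--
--     params = []
--     depth = 0
--     current = ''
--
--     for char in param_str:
--         if char in '({[':
--             depth += 1
--             current += char
--         elif char in ')}]':
--             depth -= 1
--             current += char
--         elif char == ',' and depth == 0:
--             param = current.strip()
--             if param:
--                 if '=' in param:
--                     param = param.split('=')[0].strip()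
--                 if not param.startswith('{') and not param.startswith('['):
--                     params.append(param)
--             current = ''
--         else:
--             current += char
--
--     param = current.strip()
--     if param:
--         if '=' in param:
--             param = param.split('=')[0].strip()
--         if not param.startswith('{') and not param.startswith('['):
--             params.append(param)
--
--     return params
-- ===== SOURCE B (Python) =====
-- def _top_split(s: str) -> list[str]:
--     """Split s at its first top-level comma, recursing on the remainder."""
--     depth = 0
--     for i, ch in enumerate(s):
--         if ch in '({[':
--             depth += 1
--         elif ch in ')}]':
--             depth -= 1
--         elif ch == ',' and depth == 0:
--             return [s[:i]] + _top_split(s[i + 1:])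
--     return [s]
--
--
-- def extract_function_params(param_str: str) -> list[str]:
--     """Extract parameter names from function signature."""
--     params = []
--     for seg in _top_split(param_str):
--         name = seg.strip()
--         if not name:
--             continue
--         if '=' in name:
--             name = name.split('=')[0].strip()
--         if not name.startswith('{') and not name.startswith('['):
--             params.append(name)
--     return params
-- ===== Notes on version B (the rewrite author's own statement) =====
-- stated objective: simpler
-- what changed: B replaces A's char-by-char accumulator loop with its duplicated emit block by a recursive top-level splitter (find the first depth-0 comma, slice, recurse) followed by one name-extraction pass over the segments, with no blank-input special case.
import Mathlib
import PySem

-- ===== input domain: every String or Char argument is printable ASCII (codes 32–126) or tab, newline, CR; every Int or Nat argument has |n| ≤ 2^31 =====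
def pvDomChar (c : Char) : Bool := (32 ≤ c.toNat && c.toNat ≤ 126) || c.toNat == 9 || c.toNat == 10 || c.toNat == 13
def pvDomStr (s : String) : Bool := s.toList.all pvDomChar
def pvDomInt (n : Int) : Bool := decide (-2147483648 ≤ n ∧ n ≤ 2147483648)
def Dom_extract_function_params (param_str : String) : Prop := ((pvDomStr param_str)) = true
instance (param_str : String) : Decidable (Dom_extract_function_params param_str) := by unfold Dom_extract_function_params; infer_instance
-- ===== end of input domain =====

-- B recursively finds the first top-level comma and slices, instead of A's char-by-char
-- accumulator loop with a duplicated tail block; objective: simpler decomposition, same cost.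

-- ===== PORT A =====
-- the for-loop of A: state (depth, current, params), returns (params, final current)
def pvLoopA : List Char → Int → List Char → List (List Char) → (List (List Char) × List Char)
  | [], _, current, params => (params, current)
  | c :: rest, depth, current, params =>
    if c = '(' ∨ c = '{' ∨ c = '[' then
      pvLoopA rest (depth + 1) (current ++ [c]) params
    else if c = ')' ∨ c = '}' ∨ c = ']' then
      pvLoopA rest (depth - 1) (current ++ [c]) params
    else if c = ',' ∧ depth = 0 then
      -- the emit block of A (also duplicated after the loop)
      pvLoopA rest depth []
        (params ++
          (let param := PySem.Chars.strip current
           if param ≠ [] then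
             let param := if PySem.Chars.isIn ['='] param then
                 PySem.Chars.strip ((PySem.Chars.splitOn param ['=']).headD []) else param
             if ¬ PySem.Chars.startswith param ['{'] ∧ ¬ PySem.Chars.startswith param ['['] then
               [param] else []
           else []))
    else
      pvLoopA rest depth (current ++ [c]) params

def extract_function_params (param_str : String) : List String :=
  if PySem.Chars.strip param_str.toList = [] then []
  else
    let res := pvLoopA param_str.toList 0 [] []
    let params := res.1
    let current := res.2
    -- A's duplicated tail block on the final `current`
    let param := PySem.Chars.strip current
    (params ++
      (if param ≠ [] then
         let param := if PySem.Chars.isIn ['='] param then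
             PySem.Chars.strip ((PySem.Chars.splitOn param ['=']).headD []) else param
         if ¬ PySem.Chars.startswith param ['{'] ∧ ¬ PySem.Chars.startswith param ['['] then
           [param] else []
       else [])).map String.ofList

-- ===== PORT B =====
-- index of the first comma at bracket depth 0 (the enumerate scan of _top_split)
def pvFindCutB : List Char → Int → Option Nat
  | [], _ => none
  | c :: rest, depth =>
    if c = '(' ∨ c = '{' ∨ c = '[' then (pvFindCutB rest (depth + 1)).map (· + 1)
    else if c = ')' ∨ c = '}' ∨ c = ']' then (pvFindCutB rest (depth - 1)).map (· + 1)
    else if c = ',' ∧ depth = 0 then some 0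
    else (pvFindCutB rest depth).map (· + 1)

theorem pvFindCutB_lt : ∀ (cs : List Char) (d : Int) (i : Nat),
    pvFindCutB cs d = some i → i < cs.length := by
  intro cs
  induction cs with
  | nil => intro d i h; simp [pvFindCutB] at h
  | cons c rest ih =>
    intro d i h
    simp only [pvFindCutB] at h
    split_ifs at h with h1 h2 h3
    · rcases Option.map_eq_some_iff.mp h with ⟨j, hj, rfl⟩
      have := ih _ _ hj; simp; omega
    · rcases Option.map_eq_some_iff.mp h with ⟨j, hj, rfl⟩
      have := ih _ _ hj; simp; omega
    · cases h; simp
    · rcases Option.map_eq_some_iff.mp h with ⟨j, hj, rfl⟩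
      have := ih _ _ hj; simp; omega

-- _top_split: slice off the piece before the first top-level comma and recurse
def pvTopSplitB (cs : List Char) : List (List Char) :=
  match h : pvFindCutB cs 0 with
  | none => [cs]
  | some i => cs.take i :: pvTopSplitB (cs.drop (i + 1))
termination_by cs.length
decreasing_by
  have := pvFindCutB_lt cs 0 i h
  simp [List.length_drop]; omega

def extract_function_params_alt (param_str : String) : List String :=
  ((pvTopSplitB param_str.toList).foldl
    (fun params seg =>
      let name := PySem.Chars.strip seg
      if name = [] then params
      else
        let name := if PySem.Chars.isIn ['='] name then
            PySem.Chars.strip ((PySem.Chars.splitOn name ['=']).headD []) else name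
        if ¬ PySem.Chars.startswith name ['{'] ∧ ¬ PySem.Chars.startswith name ['['] then
          params ++ [name] else params)
    []).map String.ofList

-- ===== PRECONDITION & SPEC =====
def Spec_extract_function_params (param_str : String) (out : List String) : Prop := out = extract_function_params_alt param_str
instance (param_str : String) (out : List String) : Decidable (Spec_extract_function_params param_str out) := by unfold Spec_extract_function_params; infer_instance

-- ===== CLAIM (what is proved, stated in full; the proofs are below) =====
def Claim_equal_extract_function_params : Prop := ∀ (param_str : String), Dom_extract_function_params param_str → Spec_extract_function_params param_str (extract_function_params param_str)

-- ===== LEMMAS AND PROOFS =====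

-- the shared per-segment emit step, as a list (0 or 1 names)
def pvEmit (seg : List Char) : List (List Char) :=
  let param := PySem.Chars.strip seg
  if param ≠ [] then
    let param := if PySem.Chars.isIn ['='] param then
        PySem.Chars.strip ((PySem.Chars.splitOn param ['=']).headD []) else param
    if ¬ PySem.Chars.startswith param ['{'] ∧ ¬ PySem.Chars.startswith param ['['] then
      [param] else []
  else []

-- the first split of cs scanned from depth d, with accumulated prefix cur
def pvSegs (cs : List Char) (d : Int) (cur : List Char) : List (List Char) :=
  match pvFindCutB cs d with
  | none => [cur ++ cs]
  | some i => (cur ++ cs.take i) :: pvTopSplitB (cs.drop (i + 1))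

theorem pvSegs_zero_nil (cs : List Char) : pvSegs cs 0 [] = pvTopSplitB cs := by
  rw [pvTopSplitB]
  unfold pvSegs
  rcases h : pvFindCutB cs 0 with _ | i <;> simp

theorem pvSegs_cons_step (c : Char) (rest : List Char) (d d' : Int) (cur : List Char)
    (hf : pvFindCutB (c :: rest) d = (pvFindCutB rest d').map (· + 1)) :
    pvSegs (c :: rest) d cur = pvSegs rest d' (cur ++ [c]) := by
  unfold pvSegs
  rw [hf]
  rcases h : pvFindCutB rest d' with _ | i <;> simp

theorem pvSegs_comma (rest : List Char) (cur : List Char) :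
    pvSegs (',' :: rest) 0 cur = cur :: pvTopSplitB rest := by
  unfold pvSegs
  have h0 : pvFindCutB (',' :: rest) 0 = some 0 := by
    simp [pvFindCutB]
  rw [h0]
  simp

theorem pvLoopA_eq : ∀ (cs : List Char) (d : Int) (cur : List Char) (params : List (List Char)),
    (pvLoopA cs d cur params).1 ++ pvEmit (pvLoopA cs d cur params).2
      = params ++ (pvSegs cs d cur).flatMap pvEmit := by
  intro cs
  induction cs with
  | nil => intro d cur params; simp [pvLoopA, pvSegs, pvFindCutB, pvEmit]
  | cons c rest ih =>
    intro d cur params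
    simp only [pvLoopA]
    by_cases h1 : c = '(' ∨ c = '{' ∨ c = '['
    · rw [if_pos h1, ih, pvSegs_cons_step c rest d (d + 1) cur
        (by simp only [pvFindCutB]; rw [if_pos h1])]
    · by_cases h2 : c = ')' ∨ c = '}' ∨ c = ']'
      · rw [if_neg h1, if_pos h2, ih, pvSegs_cons_step c rest d (d - 1) cur
          (by simp only [pvFindCutB]; rw [if_neg h1, if_pos h2])]
      · by_cases h3 : c = ',' ∧ d = 0
        · obtain ⟨hc, hd⟩ := h3; subst hc; subst hd
          rw [if_neg h1, if_neg h2, if_pos ⟨rfl, rfl⟩, ih, pvSegs_comma, pvSegs_zero_nil]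
          simp [pvEmit]
        · rw [if_neg h1, if_neg h2, if_neg h3, ih, pvSegs_cons_step c rest d d cur
            (by simp only [pvFindCutB]; rw [if_neg h1, if_neg h2, if_neg h3])]

theorem foldlB_eq : ∀ (l : List (List Char)) (acc : List (List Char)),
    l.foldl
      (fun params seg =>
        let name := PySem.Chars.strip seg
        if name = [] then params
        else
          let name := if PySem.Chars.isIn ['='] name then
              PySem.Chars.strip ((PySem.Chars.splitOn name ['=']).headD []) else name
          if ¬ PySem.Chars.startswith name ['{'] ∧ ¬ PySem.Chars.startswith name ['['] then
            params ++ [name] else params)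
      acc = acc ++ l.flatMap pvEmit := by
  intro l
  induction l with
  | nil => intro acc; simp
  | cons seg rest ih =>
    intro acc
    rw [List.foldl_cons, ih]
    simp only [List.flatMap_cons, pvEmit]
    by_cases h1 : PySem.Chars.strip seg = []
    · simp [h1]
    · simp only [h1, if_false, ne_eq, not_false_iff, if_true]
      split_ifs <;> simp

theorem strip_nil_no_comma (cs : List Char) (h : PySem.Chars.strip cs = []) : ',' ∉ cs := by
  intro hmem
  have hsp : ∀ c ∈ cs, PySem.Chars.isspace c = true := by
    have h2 : PySem.Chars.lstrip cs = [] := by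
      by_contra hne
      unfold PySem.Chars.strip PySem.Chars.rstrip at h
      rw [List.reverse_eq_nil_iff, List.dropWhile_eq_nil_iff] at h
      have : PySem.Chars.lstrip cs = [] := by
        rcases hh : PySem.Chars.lstrip cs with _ | ⟨a, t⟩
        · rfl
        · have hhead : ¬ PySem.Chars.isspace a = true := by
            have := List.head?_dropWhile_not (p := PySem.Chars.isspace) (l := cs)
            unfold PySem.Chars.lstrip at hh
            rw [hh] at this; simp at this; simpa using this
          have : PySem.Chars.isspace a = true := by
            apply h a; simp [hh]
          exact absurd this hhead
      exact hne this
    intro c hc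
    unfold PySem.Chars.lstrip at h2
    rw [List.dropWhile_eq_nil_iff] at h2
    exact h2 c hc
  have := hsp ',' hmem
  simp [PySem.Chars.isspace] at this

theorem no_comma_findCut (cs : List Char) (h : ',' ∉ cs) (d : Int) : pvFindCutB cs d = none := by
  induction cs generalizing d with
  | nil => rfl
  | cons c rest ih =>
    simp only [List.mem_cons, not_or] at h
    simp only [pvFindCutB]
    split_ifs with h1 h2 h3
    · rw [ih h.2]; rfl
    · rw [ih h.2]; rfl
    · exact absurd h3.1.symm h.1
    · rw [ih h.2]; rfl

-- ===== VERDICT (by name: the statement is the Claim_ definition above) =====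
theorem extract_function_params_spec : Claim_equal_extract_function_params := by
  intro s _
  unfold Spec_extract_function_params extract_function_params extract_function_params_alt
  rw [foldlB_eq]
  by_cases hb : PySem.Chars.strip s.toList = []
  · have hnone : pvFindCutB s.toList 0 = none :=
      no_comma_findCut _ (strip_nil_no_comma _ hb) 0
    have htop : pvTopSplitB s.toList = [s.toList] := by
      rw [pvTopSplitB]
      split
      · rfl
      · next i hi => rw [hnone] at hi; cases hi
    simp [hb, htop, pvEmit]
  · have h := pvLoopA_eq s.toList 0 [] []
    rw [pvSegs_zero_nil] at h
    simp only [hb, ite_false]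
    simp only [List.nil_append] at h
    rw [← h]
    simp [pvEmit]
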